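-- pv_equiv track=rewrite | github.com/cdalvise/bandi-monitor | notifica_email.py | raggruppa_per_regione
-- ===== SOURCE A (Python) =====
-- def raggruppa_per_regione(bandi: list[dict]) -> dict:
--     per_regione = {}
--     for b in bandi:
--         regione = b.get("regione", "Sconosciuta")
--         if regione not in per_regione:
--             per_regione[regione] = []
--         per_regione[regione].append(b)
--     return dict(sorted(per_regione.items()))
-- ===== SOURCE B (Python) =====
-- def raggruppa_per_regione(bandi: list[dict]) -> dict:
--     chiave = lambda b: b.get("regione", "Sconosciuta")
--     regioni = sorted({chiave(b) for b in bandi})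
--     return {r: [b for b in bandi if chiave(b) == r] for r in regioni}
-- ===== Notes on version B (the rewrite author's own statement) =====
-- stated objective: alternative
-- what changed: Instead of building a dict in one pass and sorting its items, B collects the set of region keys, sorts it, and builds the result with one filter pass of bandi per region.
import Mathlib
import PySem

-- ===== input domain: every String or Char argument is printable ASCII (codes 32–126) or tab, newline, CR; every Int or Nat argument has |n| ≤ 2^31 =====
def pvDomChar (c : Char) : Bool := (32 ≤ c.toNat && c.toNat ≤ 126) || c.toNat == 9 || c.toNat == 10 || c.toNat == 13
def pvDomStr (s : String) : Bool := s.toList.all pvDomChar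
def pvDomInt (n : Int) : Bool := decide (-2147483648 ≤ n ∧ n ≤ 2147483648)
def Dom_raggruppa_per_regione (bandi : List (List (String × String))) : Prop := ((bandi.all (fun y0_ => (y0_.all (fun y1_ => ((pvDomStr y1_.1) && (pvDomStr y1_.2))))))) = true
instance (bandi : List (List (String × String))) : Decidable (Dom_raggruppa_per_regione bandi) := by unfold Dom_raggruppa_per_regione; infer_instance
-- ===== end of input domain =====

-- B groups by filtering bandi once per sorted region key instead of A's single-pass dict build + item sort; alternative decomposition, no speed claim.

-- b.get("regione", "Sconosciuta")
def keyOf (b : List (String × String)) : String :=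
  PySem.Dict.getD (PySem.Dict.mk b) "regione" "Sconosciuta"

-- ===== PORT A =====
-- Python sorts the dict's (key, value) items; the keys are distinct, so the tuple
-- comparison never reaches the second component: sorting by the key is exact.
def raggruppa_per_regione (bandi : List (List (String × String))) : List (String × List (List (String × String))) :=
  let per_regione : PySem.Dict String (List (List (String × String))) :=
    bandi.foldl (fun d b =>
      let regione := keyOf b
      let d := if d.contains regione then d else d.insert regione []
      d.insert regione (d.getD regione [] ++ [b]))  -- per_regione[regione].append(b)
      PySem.Dict.empty
  PySem.List.sorted per_regione.items (fun p => p.1) false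

-- ===== PORT B =====
def raggruppa_per_regione_alt (bandi : List (List (String × String))) : List (String × List (List (String × String))) :=
  let regioni := PySem.List.sorted (PySem.Set.ofList (bandi.map keyOf)) (fun r => r) false
  regioni.map (fun r => (r, bandi.filter (fun b => keyOf b == r)))

-- ===== PRECONDITION & SPEC =====
def Spec_raggruppa_per_regione (bandi : List (List (String × String))) (out : List (String × List (List (String × String)))) : Prop := out = raggruppa_per_regione_alt bandi
instance (bandi : List (List (String × String))) (out : List (String × List (List (String × String)))) : Decidable (Spec_raggruppa_per_regione bandi out) := by unfold Spec_raggruppa_per_regione; infer_instance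

-- ===== CLAIM (what is proved, stated in full; the proofs are below) =====
def Claim_equal_raggruppa_per_regione : Prop := ∀ (bandi : List (List (String × String))), Dom_raggruppa_per_regione bandi → Spec_raggruppa_per_regione bandi (raggruppa_per_regione bandi)

-- ===== LEMMAS AND PROOFS =====

-- A's "if absent insert []; then append" step is one modify.
lemma step_eq_modify (d : PySem.Dict String (List (List (String × String)))) (b : List (String × String)) :
    (let r := keyOf b
     let d := if d.contains r then d else d.insert r []
     d.insert r (d.getD r [] ++ [b])) = d.modify (keyOf b) [] (· ++ [b]) := by
  dsimp only
  by_cases h : d.contains (keyOf b) = true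
  · rw [if_pos h]
    simp [PySem.Dict.modify]
  · rw [if_neg h]
    have h' : d.contains (keyOf b) = false := by simpa using h
    simp [PySem.Dict.modify, PySem.Dict.insert_insert_self, PySem.Dict.getD_insert_self,
      PySem.Dict.getD_of_not_contains, h']

-- A's dict, characterised.
lemma dict_items_char (bandi : List (List (String × String))) :
    (bandi.foldl (fun d b =>
      let regione := keyOf b
      let d := if d.contains regione then d else d.insert regione []
      d.insert regione (d.getD regione [] ++ [b]))
      (PySem.Dict.empty : PySem.Dict String (List (List (String × String))))).items
    = (PySem.Set.ofList (bandi.map keyOf)).map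
        (fun r => (r, bandi.filter (fun b => keyOf b == r))) := by
  have hfun : (fun (d : PySem.Dict String (List (List (String × String)))) b =>
      let regione := keyOf b
      let d := if d.contains regione then d else d.insert regione []
      d.insert regione (d.getD regione [] ++ [b]))
      = fun d b => d.modify (keyOf b) [] (· ++ [b]) :=
    funext fun d => funext fun b => step_eq_modify d b
  rw [hfun]
  have hm : bandi.foldl (fun d b => d.modify (keyOf b) [] (· ++ [b]))
        (PySem.Dict.empty : PySem.Dict String (List (List (String × String))))
      = (bandi.map (fun b => (keyOf b, b))).foldl
          (fun d p => d.modify p.1 [] (· ++ [p.2])) PySem.Dict.empty := by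
    rw [List.foldl_map]
  rw [hm]
  have hnd : ((bandi.map (fun b => (keyOf b, b))).foldl
      (fun d p => d.modify p.1 [] (· ++ [p.2]))
      (PySem.Dict.empty : PySem.Dict String (List (List (String × String))))).keys.Nodup := by
    exact PySem.Dict.nodup_keys_foldl_modify_key (bandi.map (fun b => (keyOf b, b)))
      Prod.fst [] (fun _ p => (· ++ [p.2])) PySem.Dict.empty PySem.Dict.nodup_keys_empty
  rw [PySem.Dict.items_eq_map_keys _ hnd []]
  have hkeys : ((bandi.map (fun b => (keyOf b, b))).foldl
      (fun d p => d.modify p.1 [] (· ++ [p.2]))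
      (PySem.Dict.empty : PySem.Dict String (List (List (String × String))))).keys
      = PySem.Set.ofList (bandi.map keyOf) := by
    rw [PySem.Dict.keys_foldl_modify_key]
    simp only [PySem.Dict.keys_empty, PySem.Set.update_nil_left, List.map_map]
    rfl
  rw [hkeys]
  refine List.map_congr_left ?_
  intro r _
  have hg := PySem.Dict.getD_foldl_modify_append
    (l := bandi.map (fun b => (keyOf b, b)))
    (d := (PySem.Dict.empty : PySem.Dict String (List (List (String × String))))) (c := r)
  rw [hg]
  simp [List.filter_map, Function.comp_def, List.map_map]

-- ===== VERDICT (by name: the statement is the Claim_ definition above) =====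
theorem raggruppa_per_regione_spec : Claim_equal_raggruppa_per_regione := by
  intro bandi _
  unfold Spec_raggruppa_per_regione raggruppa_per_regione raggruppa_per_regione_alt
  dsimp only
  rw [dict_items_char]
  apply PySem.List.sorted_eq_of_perm_of_pairwise_lt
  · exact (PySem.List.sorted_perm _ _ _).map _
  · exact (PySem.List.sorted_ofList_pairwise_lt (xs := bandi.map keyOf)).map _ (fun a b h => h)
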